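-- pv_equiv track=rewrite | github.com/ylu1997/ylu1997.github.io | Only3000/Original_Work/utils.py | convert_to_custom_base
-- ===== SOURCE A (Python) =====
-- def convert_to_custom_base(n, bases):
--     digits = []
--     for i in range(len(bases)):
--         base = bases[i]
--         digit = n % base
--         digits.append(digit)
--         n //= base
--     return digits[::-1]
-- ===== SOURCE B (Python) =====
-- def convert_to_custom_base(n, bases):
--     # Greedy place-value decomposition: keep the still-unconsumed part of n
--     # (rem, always an exact multiple of the current place value prod) and peel
--     # off the digit at each place by exact division, subtracting its contribution.
--     # Once rem hits 0 every higher digit is 0, so prod need not grow further.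
--     digits = []
--     rem = n
--     prod = 1
--     for b in bases:
--         d = (rem // prod) % b
--         digits.append(d)
--         rem -= d * prod
--         if rem:
--             prod *= b
--     return digits[::-1]
-- ===== Notes on version B (the rewrite author's own statement) =====
-- stated objective: alternative
-- what changed: Greedy place-value decomposition: B maintains the still-unconsumed remainder of the original n and a running place-value product, extracting each digit as (rem // prod) % b (an exact division, so sign-safe for negative bases), subtracting its contribution, and freezing the product once the remainder is exhausted, instead of A's shrinking running quotient n //= base.
import Mathlib
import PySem

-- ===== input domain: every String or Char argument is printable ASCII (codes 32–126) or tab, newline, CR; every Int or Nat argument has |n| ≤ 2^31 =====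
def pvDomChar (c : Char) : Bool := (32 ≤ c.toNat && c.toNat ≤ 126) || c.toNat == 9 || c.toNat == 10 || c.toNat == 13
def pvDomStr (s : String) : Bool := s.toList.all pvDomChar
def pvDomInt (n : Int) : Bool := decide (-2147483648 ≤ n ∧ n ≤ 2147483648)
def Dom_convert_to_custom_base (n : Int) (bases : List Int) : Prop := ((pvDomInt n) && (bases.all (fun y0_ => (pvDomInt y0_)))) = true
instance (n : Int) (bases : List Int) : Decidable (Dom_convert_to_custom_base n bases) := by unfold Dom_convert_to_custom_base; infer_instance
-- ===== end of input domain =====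

-- B decomposes greedily by place value: it keeps the unconsumed remainder of the original n and a running place-value product and peels each digit by exact division, instead of A's shrinking running quotient.
-- ===== PORT A =====
def convert_to_custom_base (n : Int) (bases : List Int) : List Int :=
  -- base = bases[i]; digit = n % base; digits.append(digit); n //= base
  let st := (PySem.List.pyRange 0 (PySem.List.len bases) 1).foldl
    (fun (st : List Int × Int) i =>
      (st.1 ++ [PySem.Int.mod st.2 (PySem.List.pyGetD bases i 0)],
       PySem.Int.floordiv st.2 (PySem.List.pyGetD bases i 0)))
    ([], n)
  (PySem.List.slice? st.1 none none (-1)).getD []  -- digits[::-1]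

-- ===== PORT B =====
def convert_to_custom_base_alt (n : Int) (bases : List Int) : List Int :=
  -- d = (rem // prod) % b; digits.append(d); rem -= d * prod; if rem: prod *= b
  let st := bases.foldl
    (fun (st : List Int × Int × Int) b =>
      let d := PySem.Int.mod (PySem.Int.floordiv st.2.1 st.2.2) b
      let rem := st.2.1 - d * st.2.2
      (st.1 ++ [d], rem, if rem = 0 then st.2.2 else st.2.2 * b))
    ([], n, 1)
  (PySem.List.slice? st.1 none none (-1)).getD []  -- digits[::-1]

-- ===== PRECONDITION & SPEC =====
-- Pre_ excludes exactly the inputs where Python A raises ZeroDivisionError: a 0 among the bases.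
def Pre_convert_to_custom_base (n : Int) (bases : List Int) : Prop := (0 : Int) ∉ bases
instance (n : Int) (bases : List Int) : Decidable (Pre_convert_to_custom_base n bases) := by unfold Pre_convert_to_custom_base; infer_instance
def pvWitness_convert_to_custom_base : Int × List Int := (10, [2, 3, 5])
def Spec_convert_to_custom_base (n : Int) (bases : List Int) (out : List Int) : Prop := out = convert_to_custom_base_alt n bases
instance (n : Int) (bases : List Int) (out : List Int) : Decidable (Spec_convert_to_custom_base n bases out) := by unfold Spec_convert_to_custom_base; infer_instance

-- ===== CLAIM (what is proved, stated in full; the proofs are below) =====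
def Claim_equal_convert_to_custom_base : Prop := ∀ (n : Int) (bases : List Int), Dom_convert_to_custom_base n bases → Pre_convert_to_custom_base n bases → Spec_convert_to_custom_base n bases (convert_to_custom_base n bases)

-- ===== LEMMAS AND PROOFS =====
-- proof-only helper: the low-to-high digit list
def pvDigits : Int → List Int → List Int
  | _, [] => []
  | n, b :: r => PySem.Int.mod n b :: pvDigits (PySem.Int.floordiv n b) r

theorem foldl_digits_eq (bases : List Int) : ∀ (n : Int) (acc : List Int),
    (bases.foldl
      (fun (st : List Int × Int) base =>
        (st.1 ++ [PySem.Int.mod st.2 base], PySem.Int.floordiv st.2 base))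
      (acc, n)).1
    = acc ++ pvDigits n bases := by
  induction bases with
  | nil => intro n acc; simp [pvDigits]
  | cons b rest ih =>
      intro n acc
      simp [List.foldl_cons, ih, pvDigits]

theorem alt_loop_eq (bases : List Int) : ∀ (q prod : Int) (acc : List Int),
    prod ≠ 0 → (0 : Int) ∉ bases →
    (bases.foldl
      (fun (st : List Int × Int × Int) b =>
        let d := PySem.Int.mod (PySem.Int.floordiv st.2.1 st.2.2) b
        let rem := st.2.1 - d * st.2.2
        (st.1 ++ [d], rem, if rem = 0 then st.2.2 else st.2.2 * b))
      (acc, q * prod, prod)).1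
    = acc ++ pvDigits q bases := by
  induction bases with
  | nil => intro q prod acc _ _; simp [pvDigits]
  | cons b rest ih =>
      intro q prod acc hp hb
      have hb0 : b ≠ 0 := fun h => hb (by simp [h])
      have hbr : (0 : Int) ∉ rest := fun h => hb (by simp [h])
      have hq : PySem.Int.floordiv (q * prod) prod = q := by
        simp [PySem.Int.floordiv, Int.mul_fdiv_cancel _ hp]
      have hrem : q * prod - PySem.Int.mod q b * prod
          = PySem.Int.floordiv q b * (prod * b) := by
        have h := Int.mul_fdiv_add_fmod q b
        simp only [PySem.Int.mod, PySem.Int.floordiv]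
        linear_combination (-prod) * h
      simp only [List.foldl_cons, hq, hrem]
      by_cases h0 : PySem.Int.floordiv q b * (prod * b) = 0
      · have hq0 : PySem.Int.floordiv q b = 0 := by
          rcases mul_eq_zero.mp h0 with h | h
          · exact h
          · exact absurd h (mul_ne_zero hp hb0)
        have := ih (PySem.Int.floordiv q b) prod (acc ++ [PySem.Int.mod q b]) hp hbr
        rw [if_pos h0]
        rw [hq0] at this
        simpa [pvDigits, hq0] using this
      · have := ih (PySem.Int.floordiv q b) (prod * b) (acc ++ [PySem.Int.mod q b])
          (mul_ne_zero hp hb0) hbr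
        rw [if_neg h0]
        simpa [pvDigits] using this

theorem alt_eq_reverse_digits (n : Int) (bases : List Int) (hb : (0 : Int) ∉ bases) :
    convert_to_custom_base_alt n bases = (pvDigits n bases).reverse := by
  unfold convert_to_custom_base_alt
  have h := alt_loop_eq bases n 1 [] one_ne_zero hb
  simp only [mul_one] at h
  simp [h, PySem.List.slice?_none_none_neg_one]

-- ===== VERDICT (by name: the statement is the Claim_ definition above) =====
theorem convert_to_custom_base_spec : Claim_equal_convert_to_custom_base := by
  intro n bases _ hpre
  unfold Spec_convert_to_custom_base convert_to_custom_base
  rw [PySem.List.foldl_pyRange_pyGetD (xs := bases)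
        (f := fun (st : List Int × Int) base =>
          (st.1 ++ [PySem.Int.mod st.2 base], PySem.Int.floordiv st.2 base))
        (d := 0) (init := ([], n)) (by omega)]
  simp only [Int.toNat_zero, List.drop_zero, foldl_digits_eq, List.nil_append,
    PySem.List.slice?_none_none_neg_one, Option.getD_some, alt_eq_reverse_digits n bases hpre]
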